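-- pv_equiv track=rewrite | github.com/Katngoode/Labyrinth-for-CS-370 | Labyrinth_Functions.py | get_tile_coordinates
-- ===== SOURCE A (Python) =====
-- def get_tile_coordinates(col, row):#Function which takes in column and row and returns coordinates of tile
-- 	colRow = tuple([col, row])#Stores col row as coordinate value
--
-- 	for c in range(7):
-- 		for r in range(7):
-- 			coords = tuple([c*100+(100*3), r*100+100])#Stores coordinate value for current row and column
-- 			pos = tuple([c, r])
-- 			if pos == colRow:
-- 				return(coords)
-- ===== SOURCE B (Python) =====
-- def get_tile_coordinates(col, row):
--     # Closed form: direct range check + arithmetic instead of A's 49-iteration search.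
--     if col in range(7) and row in range(7):
--         return (int(col)*100 + 300, int(row)*100 + 100)
-- ===== Notes on version B (the rewrite author's own statement) =====
-- stated objective: simpler
-- what changed: Replaces the nested 7x7 linear search over all tiles with a single range-membership check and a closed-form coordinate computation.
import Mathlib
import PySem

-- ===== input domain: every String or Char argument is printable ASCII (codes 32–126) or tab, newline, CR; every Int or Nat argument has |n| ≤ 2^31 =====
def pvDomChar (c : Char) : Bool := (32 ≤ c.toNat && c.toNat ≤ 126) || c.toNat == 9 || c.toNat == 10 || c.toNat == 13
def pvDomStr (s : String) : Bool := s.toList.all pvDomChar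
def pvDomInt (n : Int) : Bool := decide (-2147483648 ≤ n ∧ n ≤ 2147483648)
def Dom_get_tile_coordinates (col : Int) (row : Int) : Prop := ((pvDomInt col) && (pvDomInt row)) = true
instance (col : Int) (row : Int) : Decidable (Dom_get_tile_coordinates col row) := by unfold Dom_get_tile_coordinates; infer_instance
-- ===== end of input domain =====

-- B replaces A's nested 7x7 first-match search with a single range check and closed-form arithmetic (simpler).


-- ===== PORT A =====
-- inner 'for r in range(7)' with early return
def pvLoopR (col row c : Int) : List Int → Option (Int × Int)
  | [] => none
  | r :: rs =>
    let coords := (c*100 + 100*3, r*100 + 100)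
    let pos := (c, r)
    if pos = (col, row) then some coords else pvLoopR col row c rs

-- outer 'for c in range(7)': an early return from the inner loop returns from the function
def pvLoopC (col row : Int) : List Int → Option (Int × Int)
  | [] => none
  | c :: cs =>
    match pvLoopR col row c (PySem.List.pyRange 0 7 1) with
    | some v => some v
    | none => pvLoopC col row cs

def get_tile_coordinates (col : Int) (row : Int) : Option (Int × Int) :=
  pvLoopC col row (PySem.List.pyRange 0 7 1)

-- ===== PORT B =====
-- B: range check + closed-form arithmetic
def get_tile_coordinates_alt (col : Int) (row : Int) : Option (Int × Int) :=
  if 0 ≤ col ∧ col < 7 ∧ 0 ≤ row ∧ row < 7 then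
    some (col*100 + 300, row*100 + 100)
  else
    none

-- ===== PRECONDITION & SPEC =====
def Spec_get_tile_coordinates (col : Int) (row : Int) (out : Option (Int × Int)) : Prop := out = get_tile_coordinates_alt col row
instance (col : Int) (row : Int) (out : Option (Int × Int)) : Decidable (Spec_get_tile_coordinates col row out) := by unfold Spec_get_tile_coordinates; infer_instance

-- ===== CLAIM (what is proved, stated in full; the proofs are below) =====
def Claim_equal_get_tile_coordinates : Prop := ∀ (col : Int) (row : Int), Dom_get_tile_coordinates col row → Spec_get_tile_coordinates col row (get_tile_coordinates col row)

-- ===== LEMMAS AND PROOFS =====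
-- the inner loop finds nothing when no r in the list matches
theorem pvLoopR_none (col row c : Int) (l : List Int) (h : ∀ r ∈ l, ¬((c, r) = (col, row))) :
    pvLoopR col row c l = none := by
  induction l with
  | nil => rfl
  | cons r rs ih =>
    simp only [pvLoopR, if_neg (h r (List.mem_cons_self ..))]
    exact ih (fun z hz => h z (List.mem_cons_of_mem _ hz))

-- the outer loop finds nothing when every inner loop finds nothing
theorem pvLoopC_none (col row : Int) (l : List Int)
    (h : ∀ c ∈ l, pvLoopR col row c (PySem.List.pyRange 0 7 1) = none) :
    pvLoopC col row l = none := by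
  induction l with
  | nil => rfl
  | cons c cs ih =>
    simp only [pvLoopC, h c (List.mem_cons_self ..)]
    exact ih (fun z hz => h z (List.mem_cons_of_mem _ hz))

theorem pvRange7 : PySem.List.pyRange 0 7 1 = [0, 1, 2, 3, 4, 5, 6] := by decide

theorem get_tile_coordinates_spec : Claim_equal_get_tile_coordinates := by
  intro col row _
  unfold Spec_get_tile_coordinates
  by_cases hc : 0 ≤ col ∧ col < 7
  · by_cases hr : 0 ≤ row ∧ row < 7
    · obtain ⟨hc0, hc1⟩ := hc
      obtain ⟨hr0, hr1⟩ := hr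
      interval_cases col <;> interval_cases row <;> decide
    · -- row out of range: no inner condition fires, A returns none; B's guard fails
      unfold get_tile_coordinates get_tile_coordinates_alt
      rw [if_neg (by tauto)]
      refine pvLoopC_none _ _ _ (fun c _ => pvLoopR_none _ _ _ _ (fun r hrm hp => ?_))
      rw [pvRange7] at hrm
      have h2 : r = row := (Prod.mk.injEq ..).mp hp |>.2
      fin_cases hrm <;> omega
  · -- col out of range: no condition fires at all
    unfold get_tile_coordinates get_tile_coordinates_alt
    rw [if_neg (by tauto)]
    refine pvLoopC_none _ _ _ (fun c hcm => pvLoopR_none _ _ _ _ (fun r _ hp => ?_))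
    rw [pvRange7] at hcm
    have h1 : c = col := (Prod.mk.injEq ..).mp hp |>.1
    fin_cases hcm <;> omega
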